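-- pv_equiv track=rewrite | github.com/kcerauno/SLOT_AND_HMM | hypothesis/04_re-compound_hmm/source/correct_role_analysis.py | get_boundary_positions
-- ===== SOURCE A (Python) =====
-- def get_boundary_positions(splits: tuple) -> tuple:
--     boundary_end, boundary_start = set(), set()
--     cumlen = 0
--     for base in splits[:-1]:
--         cumlen += len(base)
--         boundary_end.add(cumlen - 1)
--         boundary_start.add(cumlen)
--     return boundary_end, boundary_start
-- ===== SOURCE B (Python) =====
-- def get_boundary_positions(splits: tuple) -> tuple:
--     def cuts(pieces):
--         # divide and conquer: returns (set of prefix sums of the piece lengths, total length)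
--         if not pieces:
--             return set(), 0
--         if len(pieces) == 1:
--             L = len(pieces[0])
--             return {L}, L
--         mid = len(pieces) // 2
--         ls, lt = cuts(pieces[:mid])
--         rs, rt = cuts(pieces[mid:])
--         return ls | {lt + s for s in rs}, lt + rt
--     boundary_start, _ = cuts(list(splits[:-1]))
--     boundary_end = {s - 1 for s in boundary_start}
--     return boundary_end, boundary_start
-- ===== Notes on version B (the rewrite author's own statement) =====
-- stated objective: alternative
-- what changed: B computes the start boundaries by divide and conquer — the cut set of a block of pieces is the left half's cut set united with the right half's cut set shifted by the left half's total length — and then derives boundary_end from boundary_start by subtracting 1, instead of A's single iterative loop maintaining a running cumulative length and adding both values per step; correct because every boundary is a prefix sum of the piece lengths, and a prefix sum of left++right is either a prefix sum of left or the left total plus a prefix sum of right.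
import Mathlib
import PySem

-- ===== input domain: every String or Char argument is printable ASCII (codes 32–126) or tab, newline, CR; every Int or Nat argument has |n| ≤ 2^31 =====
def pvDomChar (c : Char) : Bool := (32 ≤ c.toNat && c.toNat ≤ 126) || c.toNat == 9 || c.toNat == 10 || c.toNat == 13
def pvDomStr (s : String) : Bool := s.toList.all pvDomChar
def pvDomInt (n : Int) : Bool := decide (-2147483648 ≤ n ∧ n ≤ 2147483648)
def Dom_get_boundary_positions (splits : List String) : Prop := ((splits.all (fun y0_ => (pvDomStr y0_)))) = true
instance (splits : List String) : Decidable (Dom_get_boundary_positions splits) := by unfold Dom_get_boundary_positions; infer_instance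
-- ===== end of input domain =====

-- B replaces A's single fused accumulator loop by divide and conquer: the cut set of a
-- block of pieces is the left half's cuts united with the right half's cuts shifted by the
-- left half's total length; boundary_end is then derived from boundary_start (alternative).

-- ===== PORT A =====
-- for base in splits[:-1]: cumlen += len(base); boundary_end.add(cumlen-1); boundary_start.add(cumlen)
def get_boundary_positions (splits : List String) : List Int × List Int :=
  let r := (PySem.List.slice splits none (some (-1))).foldl
    (fun (st : (PySem.Set Int × PySem.Set Int) × Int) base =>
      let cumlen := st.2 + PySem.Str.len base
      ((PySem.Set.add st.1.1 (cumlen - 1), PySem.Set.add st.1.2 cumlen), cumlen))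
    ((PySem.Set.empty, PySem.Set.empty), 0)
  r.1

-- ===== PORT B =====
-- def cuts(pieces): if not pieces: return set(), 0
--                   if len(pieces) == 1: L = len(pieces[0]); return {L}, L
--                   mid = len(pieces) // 2; ls, lt = cuts(pieces[:mid]); rs, rt = cuts(pieces[mid:])
--                   return ls | {lt + s for s in rs}, lt + rt
-- (the comprehension maps a set through the injective shift s ↦ lt + s, so it is order-safe)
def pvCuts : List String → PySem.Set Int × Int
  | [] => (PySem.Set.empty, 0)
  | [p] => let L : Int := PySem.Str.len p; (PySem.Set.ofList [L], L)
  | p₀ :: p₁ :: rest =>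
      let pieces := p₀ :: p₁ :: rest
      let mid := pieces.length / 2
      let l := pvCuts (PySem.List.slice pieces none (some (mid : Int)))
      let r := pvCuts (PySem.List.slice pieces (some (mid : Int)) none)
      (PySem.Set.union l.1 (PySem.Set.ofList (r.1.map (fun s => l.2 + s))), l.2 + r.2)
termination_by pieces => pieces.length
decreasing_by
  · simp only [PySem.List.slice_to_natCast, List.length_take, List.length_cons]; omega
  · simp only [PySem.List.slice_from_natCast, List.length_drop, List.length_cons]; omega

def get_boundary_positions_alt (splits : List String) : List Int × List Int :=
  let boundary_start : PySem.Set Int := (pvCuts (PySem.List.slice splits none (some (-1)))).1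
  -- {s - 1 for s in boundary_start}: injective map of a set, order-safe
  let boundary_end : PySem.Set Int := PySem.Set.ofList (boundary_start.map (fun s => s - 1))
  (boundary_end, boundary_start)

-- ===== PRECONDITION & SPEC =====
def Spec_get_boundary_positions (splits : List String) (out : List Int × List Int) : Prop := out = get_boundary_positions_alt splits
instance (splits : List String) (out : List Int × List Int) : Decidable (Spec_get_boundary_positions splits out) := by unfold Spec_get_boundary_positions; infer_instance

-- ===== CLAIM (what is proved, stated in full; the proofs are below) =====
def Claim_equal_get_boundary_positions : Prop := ∀ (splits : List String), Dom_get_boundary_positions splits → Spec_get_boundary_positions splits (get_boundary_positions splits)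

-- ===== LEMMAS AND PROOFS =====

/-- prefix sums of `ls` starting from running total `c` -/
def psums : List Int → Int → List Int
  | [], _ => []
  | L :: r, c => (c + L) :: psums r (c + L)

/-- shifting the start of the running total shifts every prefix sum -/
theorem psums_shift (ls : List Int) (a b : Int) :
    psums ls (a + b) = (psums ls b).map (fun x => a + x) := by
  induction ls generalizing b with
  | nil => simp [psums]
  | cons L r ih =>
    simp only [psums, List.map_cons, List.cons.injEq]
    exact ⟨by ring, by rw [add_assoc]; exact ih (b + L)⟩

/-- prefix sums of a concatenation: left part, then right part continued from the left's sum -/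
theorem psums_append (l r : List Int) (c : Int) :
    psums (l ++ r) c = psums l c ++ psums r (c + l.sum) := by
  induction l generalizing c with
  | nil => simp [psums]
  | cons L t ih => simp [psums, ih, add_assoc]

/-- A's fused loop, characterised: it updates both sets with the prefix sums. -/
theorem afold_eq (bs : List String) (c : Int) (e s : PySem.Set Int) :
    (bs.foldl (fun (st : (PySem.Set Int × PySem.Set Int) × Int) base =>
        ((PySem.Set.add st.1.1 (st.2 + PySem.Str.len base - 1),
          PySem.Set.add st.1.2 (st.2 + PySem.Str.len base)), st.2 + PySem.Str.len base))
      ((e, s), c)).1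
      = (PySem.Set.update e ((psums (bs.map (fun b => PySem.Str.len b)) c).map (fun x => x - 1)),
         PySem.Set.update s (psums (bs.map (fun b => PySem.Str.len b)) c)) := by
  induction bs generalizing c e s with
  | nil => simp [psums, PySem.Set.update]
  | cons L r ih =>
    simp only [List.foldl_cons, List.map_cons, psums, ih, PySem.Set.update_cons]

/-- discarding `f x` from a set mapped through injective `f` is the map of discarding `x`. -/
theorem discard_map_inj (f : Int → Int) (hf : Function.Injective f) (s : List Int) (x : Int) :
    PySem.Set.discard (s.map f) (f x) = (PySem.Set.discard s x).map f := by
  simp only [PySem.Set.discard, List.filter_map]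
  congr 1
  apply List.filter_congr
  intro a _
  simp [hf.eq_iff]

/-- set(xs) commutes with an injective map. -/
theorem ofList_map_inj (f : Int → Int) (hf : Function.Injective f) (xs : List Int) :
    PySem.Set.ofList (xs.map f) = (PySem.Set.ofList xs).map f := by
  induction xs with
  | nil => rfl
  | cons x r ih => simp only [List.map_cons, PySem.Set.ofList_cons, ih, discard_map_inj f hf]

/-- updating with a list already containing `x` absorbs a dedup of `x` when `x ∈ s`. -/
theorem update_discard_of_mem (l : List Int) (s : PySem.Set Int) (x : Int) (hx : x ∈ s) :
    PySem.Set.update s (PySem.Set.discard l x) = PySem.Set.update s l := by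
  induction l generalizing s with
  | nil => rfl
  | cons y t ih =>
    by_cases h : y = x
    · subst h
      simp only [PySem.Set.discard, List.filter_cons, beq_self_eq_true, Bool.not_true,
        Bool.false_eq_true, if_false]
      rw [show List.filter (fun z => !z == y) t = PySem.Set.discard t y from rfl, ih s hx,
        PySem.Set.update_cons, PySem.Set.add_of_mem hx]
    · simp only [PySem.Set.discard, List.filter_cons, show (!y == x) = true by simpa using h,
        if_true]
      rw [show List.filter (fun z => !z == x) t = PySem.Set.discard t x from rfl,
        PySem.Set.update_cons, PySem.Set.update_cons,
        ih _ (by rw [PySem.Set.mem_add]; exact Or.inl hx)]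

/-- s.update(set(l)) = s.update(l). -/
theorem update_ofList (l : List Int) (s : PySem.Set Int) :
    PySem.Set.update s (PySem.Set.ofList l) = PySem.Set.update s l := by
  induction l generalizing s with
  | nil => rfl
  | cons x t ih =>
    rw [PySem.Set.ofList_cons, PySem.Set.update_cons, PySem.Set.update_cons,
      update_discard_of_mem _ _ _ (by rw [PySem.Set.mem_add]; exact Or.inr rfl), ih]

/-- set(A) | t is set(A + t). -/
theorem union_ofList_left (A t : List Int) :
    PySem.Set.union (PySem.Set.ofList A) t = PySem.Set.ofList (A ++ t) := by
  rw [PySem.Set.union, PySem.Set.ofList_append]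

/-- B's divide and conquer computes set(prefix sums) together with the total length. -/
theorem cuts_eq (pieces : List String) :
    pvCuts pieces
      = (PySem.Set.ofList (psums (pieces.map (fun b => PySem.Str.len b)) 0),
         (pieces.map (fun b => PySem.Str.len b)).sum) := by
  induction pieces using pvCuts.induct with
  | case1 => simp [pvCuts, psums]
  | case2 p => simp [pvCuts, psums]
  | case3 p₀ p₁ rest pieces mid ihl ihr =>
    rw [pvCuts]
    simp only [PySem.List.slice_to_natCast, PySem.List.slice_from_natCast] at ihl ihr ⊢
    rw [ihl, ihr]
    have hinj : Function.Injective
        (fun s : Int => ((pieces.take mid).map (fun b => PySem.Str.len b)).sum + s) :=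
      fun u v h => by simpa using h
    rw [← ofList_map_inj _ hinj, union_ofList_left,
      PySem.Set.ofList_append, update_ofList, update_ofList, ← PySem.Set.ofList_append]
    have hsplit : pieces.take mid ++ pieces.drop mid = p₀ :: p₁ :: rest := List.take_append_drop _ _
    dsimp only
    simp only [Prod.mk.injEq]
    constructor
    · congr 1
      conv_rhs => rw [← hsplit]
      rw [List.map_append, psums_append, zero_add]
      congr 1
      simpa using (psums_shift ((pieces.drop mid).map (fun b => PySem.Str.len b))
        (((pieces.take mid).map (fun b => PySem.Str.len b)).sum) 0).symm
    · conv_rhs => rw [← hsplit]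
      rw [List.map_append, List.sum_append]

-- ===== VERDICT (by name: the statement is the Claim_ definition above) =====
theorem get_boundary_positions_spec : Claim_equal_get_boundary_positions := by
  intro splits _
  show get_boundary_positions splits = get_boundary_positions_alt splits
  unfold get_boundary_positions get_boundary_positions_alt
  dsimp only
  rw [afold_eq, cuts_eq, PySem.Set.update_empty, PySem.Set.update_empty]
  simp only [ofList_map_inj (fun x => x - 1) (fun u v h => by simpa using h),
    PySem.Set.ofList_ofList]
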